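-- pv_equiv track=rewrite | github.com/LelekoAI/skillfactory | SeaBattleFunction.py | all_ship_kill
-- ===== SOURCE A (Python) =====
-- def all_ship_kill(ships_dots: list[list[list[int]]], shoot_dots: list[list[int]]) -> bool:
--     all_kill: bool = True
--     for ship in ships_dots:
--         for dot in ship:
--             if dot not in shoot_dots:
--                 all_kill = False
--                 break
--         if not all_kill:
--             break
--     if all_kill:
--         return True
--     return False
-- ===== SOURCE B (Python) =====
-- def all_ship_kill(ships_dots: list[list[list[int]]], shoot_dots: list[list[int]]) -> bool:
--     # Sort all ship dots and all shot dots, then verify the ship dots are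
--     # contained in the shots with a single two-pointer merge scan.
--     need = sorted(d for ship in ships_dots for d in ship)
--     have = sorted(shoot_dots)
--     i = 0
--     n = len(have)
--     for d in need:
--         while i < n and have[i] < d:
--             i += 1
--         if i == n or have[i] != d:
--             return False
--     return True
-- ===== Notes on version B (the rewrite author's own statement) =====
-- stated objective: alternative
-- what changed: Replaces the nested loops with per-dot linear membership scans by sorting the flattened ship dots and the shot dots once and checking containment with a single two-pointer merge scan.
import Mathlib
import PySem

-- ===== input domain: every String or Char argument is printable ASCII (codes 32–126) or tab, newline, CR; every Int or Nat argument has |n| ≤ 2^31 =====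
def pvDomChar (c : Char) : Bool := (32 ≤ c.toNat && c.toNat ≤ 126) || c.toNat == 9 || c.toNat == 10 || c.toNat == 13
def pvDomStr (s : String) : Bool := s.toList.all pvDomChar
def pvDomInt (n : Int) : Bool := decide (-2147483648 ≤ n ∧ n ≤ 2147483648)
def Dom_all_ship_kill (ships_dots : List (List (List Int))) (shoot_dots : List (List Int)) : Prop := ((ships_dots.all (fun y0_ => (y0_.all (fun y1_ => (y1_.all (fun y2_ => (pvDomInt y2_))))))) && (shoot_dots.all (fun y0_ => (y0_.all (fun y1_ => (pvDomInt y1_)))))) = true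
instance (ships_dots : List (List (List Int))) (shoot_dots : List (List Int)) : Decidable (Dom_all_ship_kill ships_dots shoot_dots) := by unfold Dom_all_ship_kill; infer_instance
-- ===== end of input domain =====

-- B replaces A's nested loops with per-dot membership scans by sorting both dot lists once
-- and doing a single two-pointer merge scan (objective: alternative algorithm).


-- ===== PORT A =====
-- inner loop over one ship: returns the all_kill flag (false = broke out on a missing dot)
def shipLoopA (ship : List (List Int)) (shoot_dots : List (List Int)) : Bool :=
  match ship with
  | [] => true
  | dot :: rest =>
    if ¬ shoot_dots.contains dot then false   -- all_kill = False; break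
    else shipLoopA rest shoot_dots

def shipsLoopA (ships_dots : List (List (List Int))) (shoot_dots : List (List Int)) : Bool :=
  match ships_dots with
  | [] => true
  | ship :: rest =>
    let all_kill := shipLoopA ship shoot_dots
    if ¬ all_kill then false                  -- break
    else shipsLoopA rest shoot_dots

def all_ship_kill (ships_dots : List (List (List Int))) (shoot_dots : List (List Int)) : Bool :=
  if shipsLoopA ships_dots shoot_dots then true else false

-- ===== PORT B =====
-- the for-loop over `need` with the persistent index i into `have`: advancing i over
-- elements < d is dropping that prefix; the suffix is carried to the next iteration
def mergeScanB (need : List (List Int)) (hv : List (List Int)) : Bool :=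
  match need with
  | [] => true
  | d :: rest =>
    match hv.dropWhile (fun y => decide (y < d)) with   -- while i < n and have[i] < d: i += 1
    | [] => false                                       -- i == n
    | y :: t => if y ≠ d then false else mergeScanB rest (y :: t)

def all_ship_kill_alt (ships_dots : List (List (List Int))) (shoot_dots : List (List Int)) : Bool :=
  let need := PySem.List.sorted (ships_dots.flatMap (fun ship => ship)) (fun x => x) false
  let hv := PySem.List.sorted shoot_dots (fun x => x) false
  mergeScanB need hv

-- ===== PRECONDITION & SPEC =====
def Spec_all_ship_kill (ships_dots : List (List (List Int))) (shoot_dots : List (List Int)) (out : Bool) : Prop := out = all_ship_kill_alt ships_dots shoot_dots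
instance (ships_dots : List (List (List Int))) (shoot_dots : List (List Int)) (out : Bool) : Decidable (Spec_all_ship_kill ships_dots shoot_dots out) := by unfold Spec_all_ship_kill; infer_instance

-- ===== CLAIM (what is proved, stated in full; the proofs are below) =====
def Claim_equal_all_ship_kill : Prop := ∀ (ships_dots : List (List (List Int))) (shoot_dots : List (List Int)), Dom_all_ship_kill ships_dots shoot_dots → Spec_all_ship_kill ships_dots shoot_dots (all_ship_kill ships_dots shoot_dots)

-- ===== LEMMAS AND PROOFS =====
theorem shipLoopA_iff (ship : List (List Int)) (shoot : List (List Int)) :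
    shipLoopA ship shoot = true ↔ ∀ d ∈ ship, d ∈ shoot := by
  induction ship with
  | nil => simp [shipLoopA]
  | cons d rest ih =>
    simp only [shipLoopA]
    by_cases h : shoot.contains d <;> simp_all

theorem shipsLoopA_iff (ships : List (List (List Int))) (shoot : List (List Int)) :
    shipsLoopA ships shoot = true ↔ ∀ s ∈ ships, ∀ d ∈ s, d ∈ shoot := by
  induction ships with
  | nil => simp [shipsLoopA]
  | cons s rest ih =>
    simp only [shipsLoopA]
    by_cases h : shipLoopA s shoot <;> simp_all [shipLoopA_iff]

-- the merge scan on sorted lists decides containment of `need` in `hv`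
theorem mergeScanB_iff (need hv : List (List Int))
    (hn : need.Pairwise (· ≤ ·)) (hh : hv.Pairwise (· ≤ ·)) :
    mergeScanB need hv = true ↔ ∀ d ∈ need, d ∈ hv := by
  induction need generalizing hv with
  | nil => simp [mergeScanB]
  | cons d rest ih =>
    have hrest_pw : rest.Pairwise (· ≤ ·) := hn.sublist (List.sublist_cons_self d rest)
    have hdle : ∀ x ∈ rest, d ≤ x := fun x hx => List.rel_of_pairwise_cons hn hx
    have hdec := List.takeWhile_append_dropWhile (p := fun y => decide (y < d)) (l := hv)
    have hdropped : ∀ x ∈ hv.takeWhile (fun y => decide (y < d)), x < d := by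
      intro x hx; simpa using List.mem_takeWhile_imp hx
    have hsorted' : (hv.dropWhile (fun y => decide (y < d))).Pairwise (· ≤ ·) :=
      hh.sublist (List.dropWhile_sublist _)
    have hmemsplit : ∀ x : List Int, d ≤ x →
        (x ∈ hv ↔ x ∈ hv.dropWhile (fun y => decide (y < d))) := by
      intro x hdx
      constructor
      · intro hxhv
        rw [← hdec] at hxhv
        rcases List.mem_append.1 hxhv with h | h
        · exact absurd (hdropped x h) (not_lt.2 hdx)
        · exact h
      · intro hx
        rw [← hdec]
        exact List.mem_append.2 (Or.inr hx)
    cases hhv2 : hv.dropWhile (fun y => decide (y < d)) with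
    | nil =>
      simp only [mergeScanB, hhv2, Bool.false_eq_true, false_iff]
      intro hall
      have := (hmemsplit d le_rfl).1 (hall d (List.mem_cons_self ..))
      rw [hhv2] at this
      simp at this
    | cons y t =>
      have hyd : d ≤ y := by
        have hh2 := List.head?_dropWhile_not (p := fun y => decide (y < d)) (l := hv)
        rw [hhv2] at hh2
        simp at hh2
        exact hh2
      rw [hhv2] at hsorted' hmemsplit
      by_cases hy : y = d
      · subst hy
        simp only [mergeScanB, hhv2, ne_eq, not_true_eq_false, if_false]
        rw [ih (y :: t) hrest_pw hsorted']
        constructor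
        · intro hall x hx
          rcases List.mem_cons.1 hx with h | h
          · subst h; exact (hmemsplit x le_rfl).2 (List.mem_cons_self ..)
          · exact (hmemsplit x (hdle x h)).2 (hall x h)
        · intro hall x hx
          exact (hmemsplit x (hdle x hx)).1 (hall x (List.mem_cons_of_mem _ hx))
      · simp only [mergeScanB, hhv2]
        rw [if_pos (by simpa using hy)]
        simp only [Bool.false_eq_true, false_iff]
        intro hall
        have hd : d ∈ y :: t := (hmemsplit d le_rfl).1 (hall d (List.mem_cons_self ..))
        rcases List.mem_cons.1 hd with h | h
        · exact hy h.symm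
        · have hyle : y ≤ d := List.rel_of_pairwise_cons hsorted' h
          exact hy (le_antisymm hyle hyd)

-- ===== VERDICT (by name: the statement is the Claim_ definition above) =====
theorem all_ship_kill_spec : Claim_equal_all_ship_kill := by
  intro ships shoot _
  unfold Spec_all_ship_kill
  have einst : (fun (a b : List Int) => a.decidableLT b)
      = fun a b => (LinearOrder.toDecidableLT (α := List Int)) a b := Subsingleton.elim _ _
  have hn : (PySem.List.sorted (ships.flatMap (fun ship => ship)) (fun x => x) false).Pairwise (· ≤ ·) := by
    rw [show (fun a b => (a : List Int).decidableLT b)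
      = fun a b => (LinearOrder.toDecidableLT (α := List Int)) a b from einst]
    exact PySem.List.sorted_pairwise (ships.flatMap (fun ship => ship)) (fun x => x)
  have hh : (PySem.List.sorted shoot (fun x => x) false).Pairwise (· ≤ ·) := by
    rw [show (fun a b => (a : List Int).decidableLT b)
      = fun a b => (LinearOrder.toDecidableLT (α := List Int)) a b from einst]
    exact PySem.List.sorted_pairwise shoot (fun x => x)
  have hB := mergeScanB_iff _ _ hn hh
  have hmem : (∀ x ∈ PySem.List.sorted (ships.flatMap (fun ship => ship)) (fun x => x) false,
      x ∈ PySem.List.sorted shoot (fun x => x) false) ↔ (∀ s ∈ ships, ∀ d ∈ s, d ∈ shoot) := by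
    constructor
    · intro hall s hs x hd
      have hx : x ∈ PySem.List.sorted (ships.flatMap (fun ship => ship)) (fun x => x) false :=
        (PySem.List.mem_sorted ..).2 (List.mem_flatMap.2 ⟨s, hs, hd⟩)
      exact (PySem.List.mem_sorted ..).1 (hall x hx)
    · intro h x hx
      rcases List.mem_flatMap.1 ((PySem.List.mem_sorted ..).1 hx) with ⟨s, hs, hd⟩
      exact (PySem.List.mem_sorted ..).2 (h s hs x hd)
  by_cases h : ∀ s ∈ ships, ∀ d ∈ s, d ∈ shoot
  · have h1 : all_ship_kill ships shoot = true := by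
      unfold all_ship_kill
      rw [if_pos ((shipsLoopA_iff ships shoot).2 h)]
    have h2 : all_ship_kill_alt ships shoot = true := by
      unfold all_ship_kill_alt
      exact hB.2 (hmem.2 h)
    rw [h1, h2]
  · have h1 : all_ship_kill ships shoot = false := by
      unfold all_ship_kill
      rw [if_neg (fun hc => h ((shipsLoopA_iff ships shoot).1 hc))]
    have h2 : all_ship_kill_alt ships shoot = false := by
      unfold all_ship_kill_alt
      rw [Bool.eq_false_iff]
      intro hc
      exact h (hmem.1 (hB.1 hc))
    rw [h1, h2]
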